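-- pv_equiv track=rewrite | github.com/MrBrantCode/unitest_baseline | mut_generate/mist_train_taco/taco_13215/solution.py | find_largest_unmarked_square
-- ===== SOURCE A (Python) =====
-- def find_largest_unmarked_square(grid: list[str]) -> int:
--     """
--     Finds the length of the side of the largest square consisting of only unmarked squares in a given grid.
--
--     Parameters:
--     grid (list[str]): A list of strings where each string represents a row in the grid.
--                       '.' indicates an unmarked square, and '*' indicates a marked square.
--
--     Returns:
--     int: The length of the side of the largest square consisting of only unmarked squares.
--     """
--     if not grid:
--         return 0
--
--     n = len(grid)
--     m = len(grid[0])
--     max_size = 0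
--     dp = [[0] * m for _ in range(n)]
--
--     for y in range(n):
--         for x in range(m):
--             if grid[y][x] == '.':
--                 if y == 0 or x == 0:
--                     dp[y][x] = 1
--                 else:
--                     dp[y][x] = min(dp[y - 1][x], dp[y][x - 1], dp[y - 1][x - 1]) + 1
--                 max_size = max(max_size, dp[y][x])
--
--     return max_size
-- ===== SOURCE B (Python) =====
-- def find_largest_unmarked_square(grid: list[str]) -> int:
--     if not grid:
--         return 0
--     n = len(grid)
--     m = len(grid[0])
--     for s in range(min(n, m), 0, -1):
--         for y in range(n - s + 1):
--             for x in range(m - s + 1):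
--                 if all(grid[y + dy][x + dx] == '.'
--                        for dy in range(s) for dx in range(s)):
--                     return s
--     return 0
-- ===== Notes on version B (the rewrite author's own statement) =====
-- stated objective: alternative
-- what changed: Replaces the dynamic-programming table with a direct geometric search: scan candidate side lengths from min(n,m) downward and return the first s for which some s x s block is entirely unmarked, checked by explicitly inspecting its cells.
import Mathlib
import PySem

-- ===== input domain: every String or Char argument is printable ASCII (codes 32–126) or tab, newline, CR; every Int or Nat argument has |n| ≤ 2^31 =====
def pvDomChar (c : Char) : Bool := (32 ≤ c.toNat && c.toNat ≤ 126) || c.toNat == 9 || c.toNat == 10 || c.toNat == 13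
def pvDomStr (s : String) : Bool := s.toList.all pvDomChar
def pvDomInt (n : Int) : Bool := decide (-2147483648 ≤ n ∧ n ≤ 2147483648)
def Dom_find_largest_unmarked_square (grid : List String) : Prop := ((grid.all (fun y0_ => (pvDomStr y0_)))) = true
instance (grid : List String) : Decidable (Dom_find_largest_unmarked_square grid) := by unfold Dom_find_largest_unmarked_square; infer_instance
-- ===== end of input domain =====

-- B replaces A's dynamic-programming table by a direct downward search over candidate side
-- lengths with an explicit all-cells block check (objective: alternative, not faster).

-- ===== PORT A =====
-- grid[y][x] (both ports read cells this way; in-range under Pre_, where Python returns)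
def pvAt (grid : List String) (y x : Int) : Char :=
  (PySem.Str.pyGet? (PySem.List.pyGetD grid y "") x).getD ' '

-- dp[y][x] read / write on the rectangular dp table (indices always in range when executed)
def pvDpGet (dp : List (List Int)) (y x : Int) : Int :=
  PySem.List.pyGetD (PySem.List.pyGetD dp y []) x 0

def pvDpSet (dp : List (List Int)) (y x : Int) (v : Int) : List (List Int) :=
  PySem.List.pySetD dp y (PySem.List.pySetD (PySem.List.pyGetD dp y []) x v)

-- the body of A's inner loop: one visit of cell (y,x), state (max_size, dp)
def pvStepA (grid : List String) (st : Int × List (List Int)) (y x : Int) : Int × List (List Int) :=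
  if pvAt grid y x == '.' then
    let v : Int :=
      if y == 0 || x == 0 then 1
      else min (min (pvDpGet st.2 (y - 1) x) (pvDpGet st.2 y (x - 1)))
             (pvDpGet st.2 (y - 1) (x - 1)) + 1
    (max st.1 v, pvDpSet st.2 y x v)
  else st

def find_largest_unmarked_square (grid : List String) : Int :=
  if grid = [] then 0
  else
    let n : Int := grid.length
    let m : Int := PySem.Str.len (PySem.List.pyGetD grid 0 "")
    let st :=
      (PySem.List.pyRange 0 n 1).foldl (fun st y =>
        (PySem.List.pyRange 0 m 1).foldl (fun st x => pvStepA grid st y x) st)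
        ((0 : Int), List.replicate grid.length (List.replicate (PySem.Str.len (PySem.List.pyGetD grid 0 "")).toNat (0 : Int)))
    st.1

-- ===== PORT B =====
def find_largest_unmarked_square_alt (grid : List String) : Int :=
  if grid = [] then 0
  else
    let n : Int := grid.length
    let m : Int := PySem.Str.len (PySem.List.pyGetD grid 0 "")
    match (PySem.List.pyRange (min n m) 0 (-1)).findSome? (fun s =>
      (PySem.List.pyRange 0 (n - s + 1) 1).findSome? (fun y =>
        (PySem.List.pyRange 0 (m - s + 1) 1).findSome? (fun x =>
          if (PySem.List.pyRange 0 s 1).all (fun dy =>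
               (PySem.List.pyRange 0 s 1).all (fun dx =>
                 pvAt grid (y + dy) (x + dx) == '.'))
          then some s else none))) with
    | some s => s
    | none => 0

-- ===== PRECONDITION & SPEC =====
-- Pre_ excludes exactly the ragged grids (a row shorter than the first row), on which
-- Python A raises IndexError when it reads grid[y][x] for x in range(len(grid[0])).
def Pre_find_largest_unmarked_square (grid : List String) : Prop :=
  ∀ row ∈ grid, PySem.Str.len (grid.headD "") ≤ PySem.Str.len row
instance (grid : List String) : Decidable (Pre_find_largest_unmarked_square grid) := by
  unfold Pre_find_largest_unmarked_square; infer_instance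

def pvWitness_find_largest_unmarked_square : List String := ["..*", "...", ".*."]

def Spec_find_largest_unmarked_square (grid : List String) (out : Int) : Prop := out = find_largest_unmarked_square_alt grid
instance (grid : List String) (out : Int) : Decidable (Spec_find_largest_unmarked_square grid out) := by unfold Spec_find_largest_unmarked_square; infer_instance

-- ===== CLAIM (what is proved, stated in full; the proofs are below) =====
def Claim_equal_find_largest_unmarked_square : Prop := ∀ (grid : List String), Dom_find_largest_unmarked_square grid → Pre_find_largest_unmarked_square grid → Spec_find_largest_unmarked_square grid (find_largest_unmarked_square grid)

-- ===== LEMMAS AND PROOFS =====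

-- The character-level model both ports are reduced to: grid as a list of rows of chars;
-- out-of-range reads give ' ' (never '.'), matching pvAt's defaults.
def pvCell (g : List (List Char)) (y x : Nat) : Bool := ((g.getD y []).getD x ' ') == '.'

-- the value A's dp table holds at (y,x): side of the largest clean square with bottom-right (y,x)
def pvMdp (g : List (List Char)) : Nat → Nat → Nat
  | 0, x => if pvCell g 0 x then 1 else 0
  | y+1, 0 => if pvCell g (y+1) 0 then 1 else 0
  | y+1, x+1 =>
      if pvCell g (y+1) (x+1) then
        min (min (pvMdp g y (x+1)) (pvMdp g (y+1) x)) (pvMdp g y x) + 1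
      else 0
termination_by y x => y + x

-- clean square of side s with bottom-right corner (y,x)
def pvSq (g : List (List Char)) (y x s : Nat) : Prop :=
  s ≤ y + 1 ∧ s ≤ x + 1 ∧ ∀ dy < s, ∀ dx < s, pvCell g (y - dy) (x - dx) = true

-- running maximum of pvMdp over the first n rows, m columns each (A's answer)
def pvM (g : List (List Char)) (n m : Nat) : Nat :=
  (List.range n).foldl (fun a y => (List.range m).foldl (fun a x => max a (pvMdp g y x)) a) 0

-- B's feasibility test for side s, and B's downward scan
def pvFeasB (g : List (List Char)) (n m s : Nat) : Bool :=
  (List.range (n - s + 1)).any fun y => (List.range (m - s + 1)).any fun x =>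
    (List.range s).all fun dy => (List.range s).all fun dx => pvCell g (y + dy) (x + dx)

def pvFeas (g : List (List Char)) (n m s : Nat) : Prop :=
  ∃ y x, y + s ≤ n ∧ x + s ≤ m ∧ ∀ dy < s, ∀ dx < s, pvCell g (y + dy) (x + dx) = true

def pvBrec (g : List (List Char)) (n m : Nat) : Nat → Nat
  | 0 => 0
  | s+1 => if pvFeasB g n m (s+1) then s + 1 else pvBrec g n m s

theorem pvMdp_pos (g : List (List Char)) (y x : Nat) (h : pvCell g y x = true) :
    1 ≤ pvMdp g y x := by
  match y, x with
  | 0, x => simp [pvMdp, h]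
  | y+1, 0 => simp [pvMdp, h]
  | y+1, x+1 => simp [pvMdp, h]

theorem pvMdp_cell (g : List (List Char)) (y x : Nat) (h : 1 ≤ pvMdp g y x) :
    pvCell g y x = true := by
  match y, x with
  | 0, x => by_cases hc : pvCell g 0 x <;> simp_all [pvMdp]
  | y+1, 0 => by_cases hc : pvCell g (y+1) 0 <;> simp_all [pvMdp]
  | y+1, x+1 => by_cases hc : pvCell g (y+1) (x+1) <;> simp_all [pvMdp]

-- L1: dp value s yields a clean square of side s at that bottom-right corner
theorem pvMdp_imp_sq (g : List (List Char)) :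
    ∀ s y x, s ≤ pvMdp g y x → pvSq g y x s := by
  intro s
  induction s with
  | zero => intro y x _; exact ⟨Nat.zero_le _, Nat.zero_le _, by omega⟩
  | succ s ih =>
    intro y x hs
    have hcell : pvCell g y x = true := pvMdp_cell g y x (by omega)
    match y, x with
    | 0, x =>
      have : pvMdp g 0 x = 1 := by simp [pvMdp, hcell]
      have hs0 : s = 0 := by omega
      subst hs0
      exact ⟨by omega, by omega, by intro dy hdy dx hdx; interval_cases dy <;> interval_cases dx <;> simpa using hcell⟩
    | y+1, 0 =>
      have : pvMdp g (y+1) 0 = 1 := by simp [pvMdp, hcell]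
      have hs0 : s = 0 := by omega
      subst hs0
      exact ⟨by omega, by omega, by intro dy hdy dx hdx; interval_cases dy <;> interval_cases dx <;> simpa using hcell⟩
    | y+1, x+1 =>
      have heq : pvMdp g (y+1) (x+1)
          = min (min (pvMdp g y (x+1)) (pvMdp g (y+1) x)) (pvMdp g y x) + 1 := by
        simp [pvMdp, hcell]
      have h1 : pvSq g y (x+1) s := ih y (x+1) (by omega)
      have h2 : pvSq g (y+1) x s := ih (y+1) x (by omega)
      have h3 : pvSq g y x s := ih y x (by omega)
      obtain ⟨hb1, hb1', hc1⟩ := h1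
      obtain ⟨hb2, hb2', hc2⟩ := h2
      obtain ⟨hb3, hb3', hc3⟩ := h3
      refine ⟨by omega, by omega, ?_⟩
      intro dy hdy dx hdx
      rcases Nat.eq_zero_or_pos dy with hdy0 | hdyp
      · rcases Nat.eq_zero_or_pos dx with hdx0 | hdxp
        · subst hdy0; subst hdx0; simpa using hcell
        · -- dy = 0, dx ≥ 1 : from the square at (y+1, x)
          subst hdy0
          have := hc2 0 (by omega) (dx - 1) (by omega)
          have hx : x - (dx - 1) = x + 1 - dx := by omega
          simpa [hx] using this
      · rcases Nat.eq_zero_or_pos dx with hdx0 | hdxp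
        · -- dy ≥ 1, dx = 0 : from the square at (y, x+1)
          subst hdx0
          have := hc1 (dy - 1) (by omega) 0 (by omega)
          have hy : y - (dy - 1) = y + 1 - dy := by omega
          simpa [hy] using this
        · -- dy ≥ 1, dx ≥ 1 : from the square at (y, x)
          have := hc3 (dy - 1) (by omega) (dx - 1) (by omega)
          have hy : y - (dy - 1) = y + 1 - dy := by omega
          have hx : x - (dx - 1) = x + 1 - dx := by omega
          simpa [hy, hx] using this

-- L2: a clean square of side s at bottom-right (y,x) forces dp ≥ s there
theorem pvSq_imp_mdp (g : List (List Char)) :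
    ∀ s y x, pvSq g y x s → s ≤ pvMdp g y x := by
  intro s
  induction s with
  | zero => intro y x _; omega
  | succ s ih =>
    intro y x hsq
    obtain ⟨hb, hb', hc⟩ := hsq
    have hcell : pvCell g y x = true := by simpa using hc 0 (by omega) 0 (by omega)
    rcases Nat.eq_zero_or_pos s with hs0 | hsp
    · subst hs0; exact pvMdp_pos g y x hcell
    · -- s ≥ 1 forces y ≥ 1 and x ≥ 1
      have hy1 : 1 ≤ y := by omega
      have hx1 : 1 ≤ x := by omega
      obtain ⟨y', rfl⟩ : ∃ y', y = y' + 1 := ⟨y - 1, by omega⟩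
      obtain ⟨x', rfl⟩ : ∃ x', x = x' + 1 := ⟨x - 1, by omega⟩
      have h1 : s ≤ pvMdp g y' (x'+1) := by
        refine ih y' (x'+1) ⟨by omega, by omega, ?_⟩
        intro dy hdy dx hdx
        have := hc (dy + 1) (by omega) dx (by omega)
        simpa [Nat.succ_sub_succ] using this
      have h2 : s ≤ pvMdp g (y'+1) x' := by
        refine ih (y'+1) x' ⟨by omega, by omega, ?_⟩
        intro dy hdy dx hdx
        have := hc dy (by omega) (dx + 1) (by omega)
        simpa [Nat.succ_sub_succ] using this
      have h3 : s ≤ pvMdp g y' x' := by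
        refine ih y' x' ⟨by omega, by omega, ?_⟩
        intro dy hdy dx hdx
        have := hc (dy + 1) (by omega) (dx + 1) (by omega)
        simpa [Nat.succ_sub_succ] using this
      have heq : pvMdp g (y'+1) (x'+1)
          = min (min (pvMdp g y' (x'+1)) (pvMdp g (y'+1) x')) (pvMdp g y' x') + 1 := by
        simp [pvMdp, hcell]
      omega

-- characterisation of pvM as max over a flat list
theorem pv_foldl_foldl_max (l : List Nat) (h : Nat → List Nat) (a : Nat) :
    l.foldl (fun a y => (h y).foldl max a) a = (l.flatMap h).foldl max a := by
  induction l generalizing a with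
  | nil => rfl
  | cons y t ih => simp [List.flatMap_cons, List.foldl_append, ih]

theorem pvM_eq_flat (g : List (List Char)) (n m : Nat) :
    pvM g n m = ((List.range n).flatMap (fun y => (List.range m).map (pvMdp g y))).foldl max 0 := by
  unfold pvM
  rw [← pv_foldl_foldl_max]
  congr 1
  funext a y
  rw [← List.foldl_map]

theorem pvM_ge (g : List (List Char)) (n m : Nat) :
    ∀ y < n, ∀ x < m, pvMdp g y x ≤ pvM g n m := by
  intro y hy x hx
  rw [pvM_eq_flat]
  refine (PySem.List.le_foldl_max _ _).2 _ ?_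
  simp only [List.mem_flatMap, List.mem_map, List.mem_range]
  exact ⟨y, hy, x, hx, rfl⟩

theorem pvM_attained (g : List (List Char)) (n m : Nat) :
    pvM g n m = 0 ∨ ∃ y < n, ∃ x < m, pvM g n m = pvMdp g y x := by
  rw [pvM_eq_flat]
  rcases PySem.List.foldl_max_mem ((List.range n).flatMap (fun y => (List.range m).map (pvMdp g y))) 0 with h | h
  · exact Or.inl h
  · right
    simp only [List.mem_flatMap, List.mem_map, List.mem_range] at h
    obtain ⟨y, hy, x, hx, hv⟩ := h
    exact ⟨y, hy, x, hx, hv.symm⟩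

-- feasibility Bool ↔ Prop (for 1 ≤ s ≤ n, m)
theorem pvFeasB_iff (g : List (List Char)) (n m s : Nat)
    (hsn : s ≤ n) (hsm : s ≤ m) :
    pvFeasB g n m s = true ↔ pvFeas g n m s := by
  unfold pvFeasB pvFeas
  simp only [List.any_eq_true, List.all_eq_true, List.mem_range]
  constructor
  · rintro ⟨y, hy, x, hx, hc⟩
    exact ⟨y, x, by omega, by omega, fun dy hdy dx hdx => hc dy hdy dx hdx⟩
  · rintro ⟨y, x, hy, hx, hc⟩
    exact ⟨y, by omega, x, by omega, fun dy hdy dx hdx => hc dy hdy dx hdx⟩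

-- every feasible side is at most A's maximum
theorem pvFeas_le_M (g : List (List Char)) (n m s : Nat) (hf : pvFeas g n m s) :
    s ≤ pvM g n m := by
  rcases Nat.eq_zero_or_pos s with hs0 | hsp
  · omega
  obtain ⟨y, x, hy, hx, hc⟩ := hf
  have hsq : pvSq g (y + s - 1) (x + s - 1) s := by
    refine ⟨by omega, by omega, ?_⟩
    intro dy hdy dx hdx
    have := hc (s - 1 - dy) (by omega) (s - 1 - dx) (by omega)
    have e1 : y + s - 1 - dy = y + (s - 1 - dy) := by omega
    have e2 : x + s - 1 - dx = x + (s - 1 - dx) := by omega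
    rw [e1, e2]; exact this
  have := pvSq_imp_mdp g s (y + s - 1) (x + s - 1) hsq
  have := pvM_ge g n m (y + s - 1) (by omega) (x + s - 1) (by omega)
  omega

-- A's maximum, when positive, is itself feasible (and fits in the grid)
theorem pvM_feas (g : List (List Char)) (n m : Nat) (hpos : 0 < pvM g n m) :
    pvFeas g n m (pvM g n m) ∧ pvM g n m ≤ n ∧ pvM g n m ≤ m := by
  rcases pvM_attained g n m with h0 | ⟨y, hy, x, hx, hv⟩
  · omega
  set s := pvM g n m with hs
  obtain ⟨hb, hb', hc⟩ := pvMdp_imp_sq g s y x (le_of_eq hv)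
  refine ⟨⟨y + 1 - s, x + 1 - s, by omega, by omega, ?_⟩, by omega, by omega⟩
  intro dy hdy dx hdx
  have := hc (s - 1 - dy) (by omega) (s - 1 - dx) (by omega)
  have e1 : y - (s - 1 - dy) = y + 1 - s + dy := by omega
  have e2 : x - (s - 1 - dx) = x + 1 - s + dx := by omega
  rw [e1, e2] at this; exact this

-- the downward scan lands exactly on A's maximum
theorem pvBrec_eq (g : List (List Char)) (n m : Nat) :
    ∀ k, pvM g n m ≤ k → k ≤ min n m → pvBrec g n m k = pvM g n m := by
  intro k
  induction k with
  | zero => intro h _; simpa [pvBrec] using Nat.le_antisymm (Nat.zero_le _) h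
  | succ k ih =>
    intro hM hk
    by_cases he : pvM g n m = k + 1
    · have hf : pvFeasB g n m (k+1) = true := by
        rw [pvFeasB_iff g n m (k+1) (by omega) (by omega)]
        have := (pvM_feas g n m (by omega)).1
        rwa [he] at this
      simp [pvBrec, hf, he]
    · have hM' : pvM g n m ≤ k := by omega
      have hf : pvFeasB g n m (k+1) = false := by
        by_contra hcon
        have : pvFeasB g n m (k+1) = true := by
          cases h : pvFeasB g n m (k+1) <;> simp_all
        rw [pvFeasB_iff g n m (k+1) (by omega) (by omega)] at this
        have := pvFeas_le_M g n m (k+1) this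
        omega
      simp only [pvBrec, hf, Bool.false_eq_true, if_false]
      exact ih hM' (by omega)

theorem pvBrec_eq_M (g : List (List Char)) (n m : Nat) :
    pvBrec g n m (min n m) = pvM g n m := by
  refine pvBrec_eq g n m (min n m) ?_ le_rfl
  rcases Nat.eq_zero_or_pos (pvM g n m) with h0 | hpos
  · omega
  · have := pvM_feas g n m hpos; omega


-- ---------- bridging the ports to the model ----------

theorem pv_pyGetD_zero_headD (grid : List String) :
    PySem.List.pyGetD grid 0 "" = grid.headD "" := by
  rw [PySem.List.pyGetD_zero]; cases grid <;> rfl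

theorem pv_getD_map_toList (grid : List String) (y : Nat) :
    (grid.map String.toList).getD y [] = (grid.getD y "").toList := by
  rcases Nat.lt_or_ge y grid.length with h | h
  · simp [List.getD_eq_getElem?_getD, List.getElem?_map, List.getElem?_eq_getElem h]
  · simp [List.getD_eq_getElem?_getD, List.getElem?_eq_none (by simpa using h : grid.length ≤ y),
      List.getElem?_eq_none (by simpa using h : (grid.map String.toList).length ≤ y)]

theorem pvAt_eq (grid : List String) (y x : Nat) :
    (pvAt grid (y : Int) (x : Int) == '.') = pvCell (grid.map String.toList) y x := by
  unfold pvAt pvCell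
  rw [pv_getD_map_toList, PySem.List.pyGetD_natCast]
  simp [List.getD_eq_getElem?_getD]

theorem pv_findSome?_if_any {α β : Type} (l : List α) (p : α → Bool) (c : β) :
    l.findSome? (fun a => if p a then some c else none) = if l.any p then some c else none := by
  induction l with
  | nil => rfl
  | cons a t ih => by_cases h : p a <;> simp [h, ih]

-- ----- bridge for port B -----

theorem pvInner_eq (grid : List String) (s : Nat)
    (hsn : s ≤ grid.length) (hsm : s ≤ (grid.headD "").toList.length) :
    (PySem.List.pyRange 0 ((grid.length : Int) - (s : Int) + 1) 1).findSome? (fun y =>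
      (PySem.List.pyRange 0 (((grid.headD "").toList.length : Int) - (s : Int) + 1) 1).findSome? (fun x =>
        if (PySem.List.pyRange 0 (s : Int) 1).all (fun dy =>
             (PySem.List.pyRange 0 (s : Int) 1).all (fun dx =>
               pvAt grid (y + dy) (x + dx) == '.'))
        then some (s : Int) else none))
    = if pvFeasB (grid.map String.toList) grid.length (grid.headD "").toList.length s
      then some (s : Int) else none := by
  have e1 : ((grid.length : Int) - (s : Int) + 1) = ((grid.length - s + 1 : Nat) : Int) := by omega
  have e2 : (((grid.headD "").toList.length : Int) - (s : Int) + 1)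
      = (((grid.headD "").toList.length - s + 1 : Nat) : Int) := by omega
  rw [e1, e2]
  simp only [pv_findSome?_if_any, PySem.List.pyRange_zero_nat, List.any_map, List.all_map,
    Function.comp_def, ← Nat.cast_add, pvAt_eq]
  rfl

theorem pvDesc (grid : List String) :
    ∀ k, k ≤ min grid.length (grid.headD "").toList.length →
    (match (PySem.List.pyRange (k : Int) 0 (-1)).findSome? (fun s =>
      (PySem.List.pyRange 0 ((grid.length : Int) - s + 1) 1).findSome? (fun y =>
        (PySem.List.pyRange 0 (((grid.headD "").toList.length : Int) - s + 1) 1).findSome? (fun x =>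
          if (PySem.List.pyRange 0 s 1).all (fun dy =>
               (PySem.List.pyRange 0 s 1).all (fun dx =>
                 pvAt grid (y + dy) (x + dx) == '.'))
          then some s else none))) with
      | some s => s
      | none => 0)
    = ((pvBrec (grid.map String.toList) grid.length (grid.headD "").toList.length k : Nat) : Int) := by
  intro k
  induction k with
  | zero =>
    intro _
    rw [PySem.List.pyRange_neg_one_eq_nil (by omega)]
    simp [pvBrec]
  | succ k ih =>
    intro hk
    rw [PySem.List.pyRange_neg_one_cons (by exact_mod_cast Nat.succ_pos k)]
    rw [List.findSome?_cons]
    rw [pvInner_eq grid (k+1) (by omega) (by omega)]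
    by_cases hf : pvFeasB (grid.map String.toList) grid.length (grid.headD "").toList.length (k+1) = true
    · rw [if_pos hf]
      have hb : pvBrec (grid.map String.toList) grid.length (grid.headD "").toList.length (k+1) = k+1 := by
        simp only [pvBrec]; exact if_pos hf
      rw [hb]
    · rw [if_neg hf]
      have e : ((k+1 : Nat) : Int) - 1 = (k : Int) := by push_cast; ring
      have hb : pvBrec (grid.map String.toList) grid.length (grid.headD "").toList.length (k+1)
          = pvBrec (grid.map String.toList) grid.length (grid.headD "").toList.length k := by
        simp only [pvBrec]; exact if_neg hf
      rw [e, hb]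
      exact ih (by omega)

theorem portB_eq (grid : List String) :
    find_largest_unmarked_square_alt grid
      = ((pvBrec (grid.map String.toList) grid.length (grid.headD "").toList.length
            (min grid.length (grid.headD "").toList.length) : Nat) : Int) := by
  by_cases hg : grid = []
  · subst hg
    simp [find_largest_unmarked_square_alt, pvBrec]
  · unfold find_largest_unmarked_square_alt
    simp only [hg, if_false]
    have hm : PySem.Str.len (PySem.List.pyGetD grid 0 "")
        = (((grid.headD "").toList.length : Nat) : Int) := by
      rw [pv_pyGetD_zero_headD]; simp [PySem.Str.len_eq]
    rw [hm]
    have hmin : min ((grid.length : Nat) : Int) (((grid.headD "").toList.length : Nat) : Int)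
        = ((min grid.length (grid.headD "").toList.length : Nat) : Int) := by push_cast; rfl
    rw [hmin]
    exact pvDesc grid (min grid.length (grid.headD "").toList.length) le_rfl

-- ----- bridge for port A -----

-- the dp table after the cells before (y,x) in row-major order have been visited
def pvTab (g : List (List Char)) (n m y x : Nat) : List (List Int) :=
  (List.range n).map (fun i => (List.range m).map (fun j =>
    if i < y ∨ (i = y ∧ j < x) then ((pvMdp g i j : Nat) : Int) else 0))

-- the running maximum after those same cells
def pvMP (g : List (List Char)) (m y x : Nat) : Nat :=
  (List.range x).foldl (fun a j => max a (pvMdp g y j)) (pvM g y m)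

theorem pv_getD_map_range {α : Type} (f : Nat → α) (n a : Nat) (d : α) (h : a < n) :
    ((List.range n).map f).getD a d = f a := by
  rw [List.getD_eq_getElem?_getD, List.getElem?_map, List.getElem?_range h]
  rfl

theorem pvTab_ext (g : List (List Char)) (n m y x y' x' : Nat)
    (h : ∀ i j, i < n → j < m →
      ((if i < y ∨ (i = y ∧ j < x) then ((pvMdp g i j : Nat) : Int) else 0)
        = (if i < y' ∨ (i = y' ∧ j < x') then ((pvMdp g i j : Nat) : Int) else 0))) :
    pvTab g n m y x = pvTab g n m y' x' := by
  unfold pvTab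
  apply List.ext_getElem
  · simp
  · intro i h1 h2
    simp only [List.length_map, List.length_range] at h1
    simp only [List.getElem_map, List.getElem_range]
    apply List.ext_getElem
    · simp
    · intro j h3 h4
      simp only [List.length_map, List.length_range] at h3
      simp only [List.getElem_map, List.getElem_range]
      exact h i j h1 h3

theorem pvTab_zero (g : List (List Char)) (n m : Nat) :
    pvTab g n m 0 0 = List.replicate n (List.replicate m 0) := by
  unfold pvTab
  apply List.ext_getElem
  · simp
  · intro i h1 h2
    simp only [List.getElem_map, List.getElem_range, List.getElem_replicate]
    apply List.ext_getElem
    · simp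
    · intro j h3 h4
      simp

theorem pvMP_zero (g : List (List Char)) (m y : Nat) : pvMP g m y 0 = pvM g y m := by
  simp [pvMP]

theorem pvMP_succ (g : List (List Char)) (m y x : Nat) :
    pvMP g m y (x+1) = max (pvMP g m y x) (pvMdp g y x) := by
  simp [pvMP, List.range_succ]

theorem pvMP_last (g : List (List Char)) (m y : Nat) : pvMP g m y m = pvM g (y+1) m := by
  unfold pvMP pvM
  rw [List.range_succ, List.foldl_append]
  rfl

theorem pvTab_row_end (g : List (List Char)) (n m y : Nat) :
    pvTab g n m y m = pvTab g n m (y+1) 0 := by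
  apply pvTab_ext
  intro i j hi hj
  have : (i < y ∨ (i = y ∧ j < m)) ↔ (i < y + 1 ∨ (i = y + 1 ∧ j < 0)) := by omega
  simp only [this]

theorem pvMdp_zero_of_not_cell (g : List (List Char)) (y x : Nat)
    (h : pvCell g y x = false) : pvMdp g y x = 0 := by
  match y, x with
  | 0, x => simp [pvMdp, h]
  | y+1, 0 => simp [pvMdp, h]
  | y+1, x+1 => simp [pvMdp, h]

theorem pvMdp_one_of_edge (g : List (List Char)) (y x : Nat)
    (h : pvCell g y x = true) (he : y = 0 ∨ x = 0) : pvMdp g y x = 1 := by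
  match y, x with
  | 0, x => simp [pvMdp, h]
  | y+1, 0 => simp [pvMdp, h]
  | y+1, x+1 => omega

theorem pvMdp_rec (g : List (List Char)) (y x : Nat)
    (h : pvCell g y x = true) (hy : 1 ≤ y) (hx : 1 ≤ x) :
    pvMdp g y x = min (min (pvMdp g (y-1) x) (pvMdp g y (x-1))) (pvMdp g (y-1) (x-1)) + 1 := by
  obtain ⟨y', rfl⟩ : ∃ y', y = y' + 1 := ⟨y - 1, by omega⟩
  obtain ⟨x', rfl⟩ : ∃ x', x = x' + 1 := ⟨x - 1, by omega⟩
  simp [pvMdp, h]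

theorem pvTab_stay (g : List (List Char)) (n m y x : Nat)
    (h : pvMdp g y x = 0) : pvTab g n m y (x+1) = pvTab g n m y x := by
  apply pvTab_ext
  intro i j hi hj
  by_cases hij : i = y ∧ j = x
  · obtain ⟨rfl, rfl⟩ := hij
    simp [h]
  · have : (i < y ∨ (i = y ∧ j < x + 1)) ↔ (i < y ∨ (i = y ∧ j < x)) := by
      constructor
      · rintro (h' | ⟨rfl, h'⟩)
        · exact Or.inl h'
        · right; refine ⟨rfl, ?_⟩
          rcases Nat.lt_or_ge j x with hjx | hjx
          · exact hjx
          · exact absurd ⟨rfl, by omega⟩ hij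
      · rintro (h' | ⟨rfl, h'⟩)
        · exact Or.inl h'
        · right; exact ⟨rfl, by omega⟩
    simp only [this]

theorem pvDpGet_tab (g : List (List Char)) (n m y x a b : Nat)
    (ha : a < n) (hb : b < m) (hproc : a < y ∨ (a = y ∧ b < x)) :
    pvDpGet (pvTab g n m y x) (a : Int) (b : Int) = ((pvMdp g a b : Nat) : Int) := by
  unfold pvDpGet pvTab
  rw [PySem.List.pyGetD_natCast, PySem.List.pyGetD_natCast]
  rw [pv_getD_map_range _ n a _ ha, pv_getD_map_range _ m b _ hb]
  simp [hproc]

theorem pvDpSet_tab (g : List (List Char)) (n m y x : Nat)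
    (hy : y < n) (hx : x < m) :
    pvDpSet (pvTab g n m y x) (y : Int) (x : Int) ((pvMdp g y x : Nat) : Int)
      = pvTab g n m y (x+1) := by
  unfold pvDpSet
  rw [PySem.List.pyGetD_natCast, PySem.List.pySetD_natCast, PySem.List.pySetD_natCast]
  have hrow : (pvTab g n m y x).getD y []
      = (List.range m).map (fun j => if j < x then ((pvMdp g y j : Nat) : Int) else 0) := by
    unfold pvTab
    rw [pv_getD_map_range _ n y _ hy]
    apply List.map_congr_left
    intro j _
    by_cases hj : j < x <;> simp [hj]
  rw [hrow]
  unfold pvTab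
  apply List.ext_getElem
  · simp
  · intro i h1 h2
    simp only [List.length_set, List.length_map, List.length_range] at h1 h2
    rw [List.getElem_set]
    simp only [List.getElem_map, List.getElem_range]
    rcases eq_or_ne y i with rfl | hiy
    · rw [if_pos rfl]
      apply List.ext_getElem
      · simp
      · intro j h3 h4
        simp only [List.length_set, List.length_map, List.length_range] at h3 h4
        rw [List.getElem_set]
        simp only [List.getElem_map, List.getElem_range]
        rcases eq_or_ne x j with rfl | hjx
        · rw [if_pos rfl]
          simp [Nat.lt_succ_self]
        · rw [if_neg hjx]
          by_cases hj : j < x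
          · have hj1 : j < x + 1 := by omega
            simp [hj, hj1]
          · have hj1 : ¬ j < x + 1 := by omega
            simp [hj, hj1]
    · rw [if_neg hiy]
      apply List.ext_getElem
      · simp
      · intro j h3 h4
        simp only [List.length_map, List.length_range] at h3 h4
        simp only [List.getElem_map, List.getElem_range]
        have hiy' : ¬ i = y := fun h => hiy h.symm
        by_cases hi : i < y <;> simp [hi, hiy']

theorem pvStepA_eq (grid : List String) (y x : Nat)
    (hy : y < grid.length) (hx : x < (grid.headD "").toList.length) :
    pvStepA grid
      (((pvMP (grid.map String.toList) (grid.headD "").toList.length y x : Nat) : Int),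
        pvTab (grid.map String.toList) grid.length (grid.headD "").toList.length y x)
      (y : Int) (x : Int)
    = (((pvMP (grid.map String.toList) (grid.headD "").toList.length y (x+1) : Nat) : Int),
        pvTab (grid.map String.toList) grid.length (grid.headD "").toList.length y (x+1)) := by
  set g := grid.map String.toList with hg
  set n := grid.length with hn
  set m := (grid.headD "").toList.length with hm
  unfold pvStepA
  rw [pvAt_eq]
  by_cases hc : pvCell g y x = true
  · rw [if_pos hc]
    by_cases he : y = 0 ∨ x = 0
    · have hbeq : (((y : Int) == 0) || ((x : Int) == 0)) = true := by
        rcases he with rfl | rfl <;> simp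
      have hdp : pvMdp g y x = 1 := pvMdp_one_of_edge g y x hc he
      simp only [hbeq, if_pos rfl]
      refine Prod.ext ?_ ?_
      · show max _ 1 = _
        rw [pvMP_succ, hdp]
        push_cast
        rfl
      · show pvDpSet _ (y : Int) (x : Int) 1 = _
        have := pvDpSet_tab g n m y x hy hx
        rw [hdp] at this
        simpa using this
    · push_neg at he
      obtain ⟨hy1, hx1⟩ := he
      have hbeq : (((y : Int) == 0) || ((x : Int) == 0)) = false := by
        simp [hy1, hx1]
      have ecy : (y : Int) - 1 = ((y - 1 : Nat) : Int) := by omega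
      have ecx : (x : Int) - 1 = ((x - 1 : Nat) : Int) := by omega
      have r1 := pvDpGet_tab g n m y x (y-1) x (by omega) hx (by omega)
      have r2 := pvDpGet_tab g n m y x y (x-1) hy (by omega) (by omega)
      have r3 := pvDpGet_tab g n m y x (y-1) (x-1) (by omega) (by omega) (by omega)
      have hdp : pvMdp g y x
          = min (min (pvMdp g (y-1) x) (pvMdp g y (x-1))) (pvMdp g (y-1) (x-1)) + 1 :=
        pvMdp_rec g y x hc (by omega) (by omega)
      simp only [hbeq, Bool.false_eq_true, if_false]
      have hv : (min (min (pvDpGet (pvTab g n m y x) ((y : Int) - 1) (x : Int))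
            (pvDpGet (pvTab g n m y x) (y : Int) ((x : Int) - 1)))
            (pvDpGet (pvTab g n m y x) ((y : Int) - 1) ((x : Int) - 1)) + 1)
          = ((pvMdp g y x : Nat) : Int) := by
        rw [ecy, ecx, r1, r2, r3, hdp]
        push_cast
        rfl
      rw [hv]
      refine Prod.ext ?_ ?_
      · show max _ _ = _
        rw [pvMP_succ]
        push_cast
        rfl
      · exact pvDpSet_tab g n m y x hy hx
  · rw [if_neg hc]
    have h0 : pvCell g y x = false := by simpa using hc
    have hdp : pvMdp g y x = 0 := pvMdp_zero_of_not_cell g y x h0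
    refine Prod.ext ?_ ?_
    · show _ = (((pvMP g m y (x+1) : Nat) : Int))
      rw [pvMP_succ, hdp]
      simp
    · show pvTab g n m y x = pvTab g n m y (x+1)
      exact (pvTab_stay g n m y x hdp).symm

theorem pvInnerA (grid : List String) (y : Nat) (hy : y < grid.length) :
    ∀ x ≤ (grid.headD "").toList.length,
    (List.range x).foldl
        (fun st (j : Nat) => pvStepA grid st (y : Int) (j : Int))
        (((pvMP (grid.map String.toList) (grid.headD "").toList.length y 0 : Nat) : Int),
          pvTab (grid.map String.toList) grid.length (grid.headD "").toList.length y 0)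
      = (((pvMP (grid.map String.toList) (grid.headD "").toList.length y x : Nat) : Int),
          pvTab (grid.map String.toList) grid.length (grid.headD "").toList.length y x) := by
  intro x
  induction x with
  | zero => intro _; rfl
  | succ x ih =>
    intro hx
    rw [List.range_succ, List.foldl_append, ih (by omega)]
    simpa using pvStepA_eq grid y x hy (by omega)

theorem pvOuterA (grid : List String) :
    ∀ y ≤ grid.length,
    (List.range y).foldl
        (fun st (i : Nat) => (List.range (grid.headD "").toList.length).foldl
          (fun st (j : Nat) => pvStepA grid st (i : Int) (j : Int)) st)
        ((0 : Int), pvTab (grid.map String.toList) grid.length (grid.headD "").toList.length 0 0)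
      = (((pvM (grid.map String.toList) y (grid.headD "").toList.length : Nat) : Int),
          pvTab (grid.map String.toList) grid.length (grid.headD "").toList.length y 0) := by
  intro y
  induction y with
  | zero => intro _; rfl
  | succ y ih =>
    intro hy
    rw [List.range_succ, List.foldl_append, ih (by omega)]
    have h1 : ((pvM (grid.map String.toList) y (grid.headD "").toList.length : Nat) : Int)
        = ((pvMP (grid.map String.toList) (grid.headD "").toList.length y 0 : Nat) : Int) := by
      rw [pvMP_zero]
    rw [h1]
    simp only [List.foldl_cons, List.foldl_nil]
    rw [pvInnerA grid y (by omega) (grid.headD "").toList.length le_rfl, pvMP_last, pvTab_row_end]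

theorem portA_eq (grid : List String) :
    find_largest_unmarked_square grid
      = ((pvM (grid.map String.toList) grid.length (grid.headD "").toList.length : Nat) : Int) := by
  by_cases hg : grid = []
  · subst hg
    simp [find_largest_unmarked_square, pvM]
  · unfold find_largest_unmarked_square
    simp only [hg, if_false]
    have hm : PySem.Str.len (PySem.List.pyGetD grid 0 "")
        = (((grid.headD "").toList.length : Nat) : Int) := by
      rw [pv_pyGetD_zero_headD]; simp [PySem.Str.len_eq]
    rw [hm]
    simp only [PySem.List.pyRange_zero_nat, List.foldl_map, Int.toNat_natCast]
    rw [← pvTab_zero (grid.map String.toList) grid.length (grid.headD "").toList.length]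
    rw [pvOuterA grid grid.length le_rfl]

-- ===== VERDICT (by name: the statement is the Claim_ definition above) =====
theorem find_largest_unmarked_square_spec : Claim_equal_find_largest_unmarked_square := by
  intro grid _ _
  unfold Spec_find_largest_unmarked_square
  rw [portA_eq, portB_eq, pvBrec_eq_M]
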